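-- pv_equiv track=rewrite | github.com/RIKEN-RCCS/hpl-ai | visualize_dump.py | onetwofiveseq
-- ===== SOURCE A (Python) =====
-- def onetwofiveseq(x):
-- 	base=1
-- 	while True:
-- 		if x <= 10*base:
-- 			return base
-- 		if x <= 20*base:
-- 			return 2*base
-- 		if x <= 50*base:
-- 			return 5*base
-- 		base *= 10
-- ===== SOURCE B (Python) =====
-- def onetwofiveseq(x):
--     # answer = smallest 1-2-5 round number v with 10*v >= x,
--     # i.e. the smallest 1-2-5 number >= ceil(x/10)
--     return _round125(-(-x // 10))
--
-- def _round125(t):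
--     # smallest m*10**k (m in {1,2,5}, k>=0) that is >= t (and >= 1)
--     if t <= 1:
--         return 1
--     if t <= 2:
--         return 2
--     if t <= 5:
--         return 5
--     return 10 * _round125(-(-t // 10))
-- ===== Notes on version B (the rewrite author's own statement) =====
-- stated objective: alternative
-- what changed: Replaces A's upward base-scaling loop with base-dependent thresholds by a top-down recursion on the ceiling target t = ceil(x/div), where constant thresholds select the leading one-two-five digit and the power of ten is rebuilt by scaling the recursive result of the target's next ceiling on the way back.
import Mathlib
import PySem

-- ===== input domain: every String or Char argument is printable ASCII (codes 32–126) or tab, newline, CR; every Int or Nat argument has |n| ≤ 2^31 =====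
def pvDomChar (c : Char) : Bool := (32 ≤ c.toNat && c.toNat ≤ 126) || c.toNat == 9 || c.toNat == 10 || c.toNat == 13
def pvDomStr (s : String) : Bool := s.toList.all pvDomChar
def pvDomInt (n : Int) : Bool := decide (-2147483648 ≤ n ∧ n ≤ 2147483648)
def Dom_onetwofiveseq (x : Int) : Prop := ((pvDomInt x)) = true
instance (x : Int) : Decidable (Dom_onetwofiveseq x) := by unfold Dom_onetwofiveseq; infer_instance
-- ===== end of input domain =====

-- B replaces A's upward base-scaling loop by a top-down recursion on the ceiling target ceil(x/10) (alternative decomposition, same cost).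


-- ===== PORT A =====
-- A's 'while True' loop: the three threshold-returns and the base *= 10 step, verbatim.
-- The extra hypothesis 0 < base is the loop invariant (base starts at 1) needed only for termination.
def onetwofiveseqLoopA (x base : Int) (hb : 0 < base) : Int :=
  if x ≤ 10 * base then base
  else if x ≤ 20 * base then 2 * base
  else if x ≤ 50 * base then 5 * base
  else onetwofiveseqLoopA x (base * 10) (by omega)
termination_by (x - 10 * base).toNat
decreasing_by omega

def onetwofiveseq (x : Int) : Int := onetwofiveseqLoopA x 1 (by omega)

-- ===== PORT B =====
-- B's helper _round125: recursion on the target t, Python's ceil division -(-t // 10) ported with PySem floordiv.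
def round125 (t : Int) : Int :=
  if t ≤ 1 then 1
  else if t ≤ 2 then 2
  else if t ≤ 5 then 5
  else 10 * round125 (-(PySem.Int.floordiv (-t) 10))
termination_by t.toNat
decreasing_by
  rw [PySem.Int.floordiv_eq_ediv_of_pos (by omega)]
  omega

def onetwofiveseq_alt (x : Int) : Int := round125 (-(PySem.Int.floordiv (-x) 10))

-- ===== PRECONDITION & SPEC =====
def Spec_onetwofiveseq (x : Int) (out : Int) : Prop := out = onetwofiveseq_alt x
instance (x : Int) (out : Int) : Decidable (Spec_onetwofiveseq x out) := by unfold Spec_onetwofiveseq; infer_instance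

-- ===== CLAIM (what is proved, stated in full; the proofs are below) =====
def Claim_equal_onetwofiveseq : Prop := ∀ (x : Int), Dom_onetwofiveseq x → Spec_onetwofiveseq x (onetwofiveseq x)

-- ===== LEMMAS AND PROOFS =====
-- Python ceiling division -(-a // b), 0 < b: Galois characterisation.
theorem cdiv_le_iff (a b q : Int) (hb : 0 < b) :
    -(PySem.Int.floordiv (-a) b) ≤ q ↔ a ≤ q * b := by
  rw [PySem.Int.floordiv_eq_ediv_of_pos hb]
  constructor
  · intro h
    have h' : -q ≤ (-a) / b := by omega
    have := (Int.le_ediv_iff_mul_le hb).mp h'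
    nlinarith
  · intro h
    have h' : -q * b ≤ -a := by nlinarith
    have := (Int.le_ediv_iff_mul_le hb).mpr h'
    omega

theorem cdiv_cdiv (a b c : Int) (hb : 0 < b) (hc : 0 < c) :
    -(PySem.Int.floordiv (-(-(PySem.Int.floordiv (-a) b))) c) =
      -(PySem.Int.floordiv (-a) (b * c)) := by
  have hbc : 0 < b * c := by positivity
  apply le_antisymm
  · rw [cdiv_le_iff _ _ _ hc, cdiv_le_iff _ _ _ hb]
    have : -(PySem.Int.floordiv (-a) (b * c)) ≤ -(PySem.Int.floordiv (-a) (b * c)) := le_refl _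
    rw [cdiv_le_iff _ _ _ hbc] at this
    linarith [this, mul_assoc (-(PySem.Int.floordiv (-a) (b * c))) c b]
  · rw [cdiv_le_iff _ _ _ hbc]
    have h1 : -(PySem.Int.floordiv (-(-(PySem.Int.floordiv (-a) b))) c) ≤
        -(PySem.Int.floordiv (-(-(PySem.Int.floordiv (-a) b))) c) := le_refl _
    rw [cdiv_le_iff _ _ _ hc] at h1
    rw [cdiv_le_iff _ _ _ hb] at h1
    linarith [h1, mul_assoc (-(PySem.Int.floordiv (-(-(PySem.Int.floordiv (-a) b))) c)) c b]

-- Main invariant: A's loop at scale 'base' equals base * round125 of the ceiling target at that scale.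
theorem loopA_eq_round125 (x base : Int) (hb : 0 < base) :
    onetwofiveseqLoopA x base hb = base * round125 (-(PySem.Int.floordiv (-x) (10 * base))) := by
  fun_induction onetwofiveseqLoopA x base hb with
  | case1 base hb h1 =>
      have ht : -(PySem.Int.floordiv (-x) (10 * base)) ≤ 1 := by
        rw [cdiv_le_iff _ _ _ (by omega)]; omega
      rw [round125]; simp [ht]
  | case2 base hb h1 h2 =>
      have ht1 : ¬ -(PySem.Int.floordiv (-x) (10 * base)) ≤ 1 := by
        rw [cdiv_le_iff _ _ _ (by omega)]; omega
      have ht2 : -(PySem.Int.floordiv (-x) (10 * base)) ≤ 2 := by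
        rw [cdiv_le_iff _ _ _ (by omega)]; omega
      rw [round125]; simp [ht1, ht2]; ring
  | case3 base hb h1 h2 h3 =>
      have ht1 : ¬ -(PySem.Int.floordiv (-x) (10 * base)) ≤ 1 := by
        rw [cdiv_le_iff _ _ _ (by omega)]; omega
      have ht2 : ¬ -(PySem.Int.floordiv (-x) (10 * base)) ≤ 2 := by
        rw [cdiv_le_iff _ _ _ (by omega)]; omega
      have ht5 : -(PySem.Int.floordiv (-x) (10 * base)) ≤ 5 := by
        rw [cdiv_le_iff _ _ _ (by omega)]; omega
      rw [round125]; simp [ht1, ht2, ht5]; ring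
  | case4 base hb h1 h2 h3 ih =>
      have ht5 : ¬ -(PySem.Int.floordiv (-x) (10 * base)) ≤ 5 := by
        rw [cdiv_le_iff _ _ _ (by omega)]; omega
      rw [round125]
      simp only [show ¬ -(PySem.Int.floordiv (-x) (10 * base)) ≤ 1 by omega,
        show ¬ -(PySem.Int.floordiv (-x) (10 * base)) ≤ 2 by omega, ht5, ite_false]
      rw [cdiv_cdiv x (10 * base) 10 (by omega) (by omega), ih]
      rw [show 10 * base * 10 = 10 * (base * 10) by ring]
      ring

-- ===== VERDICT (by name: the statement is the Claim_ definition above) =====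
theorem onetwofiveseq_spec : Claim_equal_onetwofiveseq := by
  intro x _
  unfold Spec_onetwofiveseq onetwofiveseq onetwofiveseq_alt
  rw [loopA_eq_round125 x 1 (by omega)]
  norm_num
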